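-- pv_equiv track=rewrite | github.com/Anand020405/Stock-Market-Tracker | Program files/functions.py | sort_timeline
-- ===== SOURCE A (Python) =====
-- TIMELINES = ["5d", "1mo", "6mo", "1y", "2y", "5y", "10y", "ytd", "max"]
--
-- def get_timeline():
--     '''
--         This function helps in retriving all the available timeline for graph creation
--     '''
--     return TIMELINES
--
-- def sort_timeline(hint):
--     """
--         This function helps in sorting the timeline based on the letters typed
--     """
--     timelines = get_timeline()
--     timeline_matching_hint = [timeline for timeline in timelines if timeline.startswith(hint)]
--     rest_of_timeline = timelines.copy()
--     for timeline in timeline_matching_hint: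
--         rest_of_timeline.remove(timeline)
--     sorted(rest_of_timeline)
--     timeline_matching_hint.extend(rest_of_timeline)
--     return timeline_matching_hint
-- ===== SOURCE B (Python) =====
-- TIMELINES = ["5d", "1mo", "6mo", "1y", "2y", "5y", "10y", "ytd", "max"]
--
-- def get_timeline():
--     return TIMELINES
--
-- def sort_timeline(hint):
--     """Single pass: partition the timelines into matches and rest, preserving order."""
--     matches = []
--     rest = []
--     for timeline in get_timeline():
--         if timeline.startswith(hint):
--             matches.append(timeline)
--         else:
--             rest.append(timeline)
--     return matches + rest
-- ===== Notes on version B (the rewrite author's own statement) =====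
-- stated objective: simpler
-- what changed: One partitioning pass appending to matches/rest replaces A's copy-then-remove-each-match two-stage construction (A's sorted() call is a discarded no-op and is dropped).
import Mathlib
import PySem

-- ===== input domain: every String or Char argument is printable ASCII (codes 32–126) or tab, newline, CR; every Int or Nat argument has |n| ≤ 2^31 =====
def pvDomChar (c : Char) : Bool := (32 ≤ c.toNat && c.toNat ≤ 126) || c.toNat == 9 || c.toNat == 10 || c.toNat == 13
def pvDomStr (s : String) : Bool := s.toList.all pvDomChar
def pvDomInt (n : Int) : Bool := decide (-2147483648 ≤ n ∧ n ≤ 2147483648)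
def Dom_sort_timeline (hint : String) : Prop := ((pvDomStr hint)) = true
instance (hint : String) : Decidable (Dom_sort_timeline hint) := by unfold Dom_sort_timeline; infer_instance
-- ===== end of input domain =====

-- B replaces A's copy-then-remove-each-match construction by one partitioning pass (simpler; A's
-- discarded sorted() no-op is dropped). Return-value equivalence only; neither version mutates its input.

-- ===== PORT A =====
def pyTIMELINES : List String := ["5d", "1mo", "6mo", "1y", "2y", "5y", "10y", "ytd", "max"]

def get_timeline : List String := pyTIMELINES

def sort_timeline (hint : String) : List String :=
  let timelines := get_timeline
  let timeline_matching_hint := timelines.filter (fun t => PySem.Str.startswith t hint)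
  let rest_of_timeline := timelines   -- timelines.copy()
  let rest_of_timeline := timeline_matching_hint.foldl
      (fun acc t => (PySem.List.remove? acc t).getD acc) rest_of_timeline
      -- list.remove: every t comes from rest_of_timeline, so remove? never returns none here
  let _ := PySem.List.sorted rest_of_timeline id false   -- A's sorted(...) call, result discarded
  timeline_matching_hint ++ rest_of_timeline

-- ===== PORT B =====
def sort_timeline_alt (hint : String) : List String :=
  let mr := get_timeline.foldl
      (fun (mr : List String × List String) t =>
        if PySem.Str.startswith t hint then (mr.1 ++ [t], mr.2) else (mr.1, mr.2 ++ [t]))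
      ([], [])
  mr.1 ++ mr.2

-- ===== PRECONDITION & SPEC =====
def Spec_sort_timeline (hint : String) (out : List String) : Prop := out = sort_timeline_alt hint
instance (hint : String) (out : List String) : Decidable (Spec_sort_timeline hint out) := by unfold Spec_sort_timeline; infer_instance

-- ===== CLAIM (what is proved, stated in full; the proofs are below) =====
def Claim_equal_sort_timeline : Prop := ∀ (hint : String), Dom_sort_timeline hint → Spec_sort_timeline hint (sort_timeline hint)

-- ===== LEMMAS AND PROOFS =====

-- folding Python's list.remove over elements none of which equals the head keeps the head in place
theorem foldRemove_cons (ts : List String) (x : String) :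
    ∀ (acc : List String), (∀ t ∈ ts, t ≠ x) →
    ts.foldl (fun acc t => (PySem.List.remove? acc t).getD acc) (x :: acc)
      = x :: ts.foldl (fun acc t => (PySem.List.remove? acc t).getD acc) acc := by
  induction ts with
  | nil => intro acc _; rfl
  | cons t ts ih =>
    intro acc h
    have hne : x ≠ t := fun e => (h t (by simp)) e.symm
    have hstep : (PySem.List.remove? (x :: acc) t).getD (x :: acc)
        = x :: (PySem.List.remove? acc t).getD acc := by
      rw [PySem.List.remove?_cons_of_ne acc hne]
      cases PySem.List.remove? acc t <;> simp
    simp only [List.foldl_cons, hstep]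
    exact ih _ (fun u hu => h u (by simp [hu]))

-- on a duplicate-free list, removing each filtered element leaves exactly the non-matching ones
theorem foldRemove_filter (p : String → Bool) :
    ∀ (L : List String), L.Nodup →
    (L.filter p).foldl (fun acc t => (PySem.List.remove? acc t).getD acc) L
      = L.filter (fun t => !p t) := by
  intro L
  induction L with
  | nil => intro _; rfl
  | cons x xs ih =>
    intro hnd
    have hx : x ∉ xs := (List.nodup_cons.mp hnd).1
    have hxs : xs.Nodup := (List.nodup_cons.mp hnd).2
    by_cases hp : p x = true
    · simp only [List.filter_cons, hp, if_pos trivial, List.foldl_cons,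
        PySem.List.remove?_cons_self, Option.getD_some]
      rw [ih hxs]
      simp
    · have hp' : p x = false := by simpa using hp
      have hfilter : (x :: xs).filter p = xs.filter p := by simp [hp']
      rw [hfilter, foldRemove_cons _ _ _ (by
        intro t ht he
        exact hx (he ▸ (List.mem_filter.mp ht).1)), ih hxs]
      simp [hp']

-- B's single partitioning pass computes the two filters, appended to the running accumulators
theorem partition_fold (p : String → Bool) :
    ∀ (L m r : List String),
    L.foldl (fun (mr : List String × List String) t =>
        if p t then (mr.1 ++ [t], mr.2) else (mr.1, mr.2 ++ [t])) (m, r)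
      = (m ++ L.filter p, r ++ L.filter (fun t => !p t)) := by
  intro L
  induction L with
  | nil => intro m r; simp
  | cons x xs ih =>
    intro m r
    by_cases hp : p x = true
    · simp [List.foldl_cons, hp, ih]
    · have hp' : p x = false := by simpa using hp
      simp [List.foldl_cons, hp', ih]

-- ===== VERDICT (by name: the statement is the Claim_ definition above) =====
theorem sort_timeline_spec : Claim_equal_sort_timeline := by
  intro hint _
  unfold Spec_sort_timeline sort_timeline sort_timeline_alt
  have hnd : get_timeline.Nodup := by decide
  simp only []
  rw [foldRemove_filter _ _ hnd, partition_fold]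
  simp
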